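-- pv_equiv track=rewrite | github.com/LeszczM/CreditScore | stability_selection.py | robust_group_map
-- ===== SOURCE A (Python) =====
-- def robust_group_map(feature_names, num_cols, cat_cols):
--     """
--     Zwraca listę 'orig_name_by_index' (o długości = liczba kolumn po transformacji),
--     która mapuje każdą kolumnę po transformacji na ORYGINALNE pole (num albo nazwa kategorycznej).
--     Robimy to po nazwach z get_feature_names_out(): 'num__col', 'cat__col_category'.
--     """
--     orig = []
--     # szybki lookup dla kat kolumn, by nie parsować po '_' (które mogą być w nazwach kategorii)
--     for name in feature_names:
--         if name.startswith("num__"):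
--             orig.append(name.split("__", 1)[1])
--         elif name.startswith("cat__"):
--             base = name.split("__", 1)[1]  # 'col_category'
--             # znajdź takie col, które jest prefixem base + '_'
--             found = None
--             for c in cat_cols:
--                 prefix = f"{c}_"
--                 if base.startswith(prefix) or base == c:
--                     found = c
--                     break
--             orig.append(found if found is not None else base.split("_", 1)[0])
--         else:
--             # fallback
--             orig.append(name)
--     return orig
-- ===== SOURCE B (Python) =====
-- def robust_group_map(feature_names, num_cols, cat_cols):
--     """Same mapping as A, computed the other way round: a first-index dictionary
--     of cat_cols is built once, and each 'cat__' feature looks up only the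
--     underscore-cut prefixes of its base (plus the base itself), keeping the
--     candidate whose cat column occurs earliest in cat_cols."""
--     first_idx = {}
--     for i, c in enumerate(cat_cols):
--         first_idx.setdefault(c, i)
--     out = []
--     for name in feature_names:
--         if name.startswith("num__"):
--             out.append(name[5:])
--         elif name.startswith("cat__"):
--             base = name[5:]
--             candidates = [base] + [base[:k] for k, ch in enumerate(base) if ch == "_"]
--             best = None
--             for cand in candidates:
--                 j = first_idx.get(cand)
--                 if j is not None and (best is None or j < best[0]):
--                     best = (j, cand)
--             out.append(best[1] if best is not None else base.split("_", 1)[0])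
--         else:
--             out.append(name)
--     return out
-- ===== Notes on version B (the rewrite author's own statement) =====
-- stated objective: alternative
-- what changed: Instead of scanning all of cat_cols for every 'cat__' feature, B builds a first-index dictionary of cat_cols once and, per feature, looks up only the underscore-cut prefixes of the base (plus the base itself), keeping the candidate whose cat column occurs earliest in cat_cols.
import Mathlib
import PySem

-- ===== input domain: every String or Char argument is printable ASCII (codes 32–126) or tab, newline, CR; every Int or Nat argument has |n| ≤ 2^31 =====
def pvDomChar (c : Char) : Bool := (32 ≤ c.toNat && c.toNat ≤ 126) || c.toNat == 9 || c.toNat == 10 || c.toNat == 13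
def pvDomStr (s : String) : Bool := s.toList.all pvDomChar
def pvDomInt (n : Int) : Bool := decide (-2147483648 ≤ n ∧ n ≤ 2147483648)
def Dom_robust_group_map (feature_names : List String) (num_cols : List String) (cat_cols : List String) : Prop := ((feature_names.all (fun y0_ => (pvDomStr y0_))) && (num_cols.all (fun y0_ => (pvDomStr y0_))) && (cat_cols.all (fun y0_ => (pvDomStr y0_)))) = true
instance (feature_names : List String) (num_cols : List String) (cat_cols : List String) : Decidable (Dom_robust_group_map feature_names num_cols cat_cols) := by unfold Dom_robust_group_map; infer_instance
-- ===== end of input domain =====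

-- B replaces A's per-feature first-match scan of cat_cols by a first-index dictionary
-- of cat_cols built once and looked up only at the underscore-cut prefixes of each
-- 'cat__' base (objective: alternative). Neither program mutates its arguments.

-- ===== PORT A =====
-- body of A's 'for name in feature_names' loop (the '.getD name' / '.getD base'
-- defaults are unreachable: the guarded name contains '__', and split always
-- returns a non-empty list, so Python raises nowhere)
def pvA_one (cat_cols : List String) (name : String) : String :=
  if PySem.Str.startswith name "num__" then
    (PySem.List.pyGet? ((PySem.Str.splitMax? name "__" 1).getD []) 1).getD name
  else if PySem.Str.startswith name "cat__" then
    let base := (PySem.List.pyGet? ((PySem.Str.splitMax? name "__" 1).getD []) 1).getD name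
    -- 'found = None; for c in cat_cols: if cond: found = c; break'
    match cat_cols.find? (fun c => PySem.Chars.startswith base.toList (c.toList ++ ['_']) || base == c) with
    | some c => c
    | none => (PySem.List.pyGet? ((PySem.Str.splitMax? base "_" 1).getD []) 0).getD base
  else name

def robust_group_map (feature_names : List String) (num_cols : List String) (cat_cols : List String) : List String :=
  feature_names.foldl (fun orig name => orig ++ [pvA_one cat_cols name]) []

-- ===== PORT B =====
-- first_idx: first index of each distinct cat column
def pvB_buildIdx (cat_cols : List String) : PySem.Dict String Int :=
  (PySem.List.enumerate cat_cols).foldl (fun d p => d.setdefault p.2 p.1) PySem.Dict.empty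

-- '[base] + [base[:k] for k, ch in enumerate(base) if ch == "_"]'
def pvB_candidates (base : String) : List String :=
  base :: ((PySem.List.enumerate base.toList).filter (fun p => p.2 == '_')).map
      (fun p => PySem.Str.slice base none (some p.1))

-- body of B's 'for cand in candidates' loop
def pvB_step (first_idx : PySem.Dict String Int) (best : Option (Int × String)) (cand : String) : Option (Int × String) :=
  match first_idx.get? cand with
  | none => best
  | some j =>
    match best with
    | none => some (j, cand)
    | some b => if j < b.1 then some (j, cand) else best

-- body of B's 'for name in feature_names' loop ('.getD base' unreachable as in A)
def pvB_one (first_idx : PySem.Dict String Int) (name : String) : String :=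
  if PySem.Str.startswith name "num__" then
    PySem.Str.slice name (some 5)
  else if PySem.Str.startswith name "cat__" then
    let base := PySem.Str.slice name (some 5)
    match (pvB_candidates base).foldl (pvB_step first_idx) none with
    | some b => b.2
    | none => (PySem.List.pyGet? ((PySem.Str.splitMax? base "_" 1).getD []) 0).getD base
  else name

def robust_group_map_alt (feature_names : List String) (num_cols : List String) (cat_cols : List String) : List String :=
  let first_idx := pvB_buildIdx cat_cols
  feature_names.foldl (fun out name => out ++ [pvB_one first_idx name]) []

-- ===== PRECONDITION & SPEC =====
def Spec_robust_group_map (feature_names : List String) (num_cols : List String) (cat_cols : List String) (out : List String) : Prop := out = robust_group_map_alt feature_names num_cols cat_cols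
instance (feature_names : List String) (num_cols : List String) (cat_cols : List String) (out : List String) : Decidable (Spec_robust_group_map feature_names num_cols cat_cols out) := by unfold Spec_robust_group_map; infer_instance

-- ===== CLAIM (what is proved, stated in full; the proofs are below) =====
def Claim_equal_robust_group_map : Prop := ∀ (feature_names : List String) (num_cols : List String) (cat_cols : List String), Dom_robust_group_map feature_names num_cols cat_cols → Spec_robust_group_map feature_names num_cols cat_cols (robust_group_map feature_names num_cols cat_cols)

-- ===== LEMMAS AND PROOFS =====

-- stepping lemmas for PySem.Chars.splitOnMax.go (no PySem lemma covers split(sep, maxsplit))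
lemma pv_go_nomatch (sep : List Char) (fuel m : Nat) (c : Char) (l cur : List Char) (acc : List (List Char)) (hm : m ≠ 0)
    (hnp : sep.isPrefixOf (c::l) = false) :
    PySem.Chars.splitOnMax.go sep (fuel+1) m (c::l) cur acc
      = PySem.Chars.splitOnMax.go sep fuel m l (c::cur) acc := by
  rw [PySem.Chars.splitOnMax.go.eq_def]; simp [hm, hnp]

lemma pv_go_match (sep : List Char) (fuel m : Nat) (c : Char) (l cur : List Char) (acc : List (List Char)) (hm : m ≠ 0)
    (hp : sep.isPrefixOf (c::l) = true) :
    PySem.Chars.splitOnMax.go sep (fuel+1) m (c::l) cur acc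
      = PySem.Chars.splitOnMax.go sep fuel (m-1) (List.drop sep.length (c::l)) [] (cur.reverse :: acc) := by
  rw [PySem.Chars.splitOnMax.go.eq_def]; simp [hm, hp]

lemma pv_go_zero (sep : List Char) (fuel : Nat) (l cur : List Char) (acc : List (List Char)) :
    PySem.Chars.splitOnMax.go sep (fuel+1) 0 l cur acc = ((cur.reverse ++ l) :: acc).reverse := by
  rw [PySem.Chars.splitOnMax.go.eq_def]
  cases l <;> simp

-- s.split("__", 1) on a string whose first '__' sits at position 3
lemma pv_split5 (a b c : Char) (ha : ¬ a = '_') (hb : ¬ b = '_') (hc : ¬ c = '_') (rest : List Char) :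
    PySem.Chars.splitOnMax (a::b::c::'_'::'_'::rest) ['_','_'] 1 = [[a,b,c], rest] := by
  simp only [PySem.Chars.splitOnMax]
  norm_num
  rw [pv_go_nomatch _ _ _ _ _ _ _ (by omega) (by simp [List.isPrefixOf]; intro h; exact absurd h.symm ha)]
  rw [pv_go_nomatch _ _ _ _ _ _ _ (by omega) (by simp [List.isPrefixOf]; intro h; exact absurd h.symm hb)]
  rw [pv_go_nomatch _ _ _ _ _ _ _ (by omega) (by simp [List.isPrefixOf]; intro h; exact absurd h.symm hc)]
  rw [pv_go_match _ _ _ _ _ _ _ (by omega) (by simp [List.isPrefixOf])]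
  rw [pv_go_zero]
  simp

-- A's base expression and B's name[5:] agree on a guarded name
lemma pv_baseA (name : String) (a b c : Char) (rest : List Char)
    (h : name.toList = a::b::c::'_'::'_'::rest)
    (ha : ¬ a = '_') (hb : ¬ b = '_') (hc : ¬ c = '_') :
    (PySem.List.pyGet? ((PySem.Str.splitMax? name "__" 1).getD []) 1).getD name = String.ofList rest := by
  simp only [PySem.Str.splitMax?, PySem.Chars.splitMax?]
  rw [show ("__" : String).toList = ['_','_'] from rfl, h]
  rw [pv_split5 a b c ha hb hc rest]
  simp [PySem.List.pyGet?, PySem.List.pyIdx?]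

lemma pv_baseB (name : String) (a b c : Char) (rest : List Char)
    (h : name.toList = a::b::c::'_'::'_'::rest) :
    PySem.Str.slice name (some 5) = String.ofList rest := by
  simp only [PySem.Str.slice, PySem.Chars.slice_eq_listSlice]
  rw [PySem.List.slice_from _ (by norm_num), h]
  rfl

lemma pv_mem_enumerate {α : Type} (l : List α) (s : Int) (p : Int × α) :
    p ∈ PySem.List.enumerate l s ↔ ∃ (k : Nat) (h : k < l.length), p = (s + k, l[k]) := by
  induction l generalizing s with
  | nil => simp [PySem.List.enumerate]
  | cons x t ih =>
    rw [show PySem.List.enumerate (x::t) s = (s,x) :: PySem.List.enumerate t (s+1) from rfl]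
    simp only [List.mem_cons, ih]
    constructor
    · rintro (rfl | ⟨k, hk, rfl⟩)
      · exact ⟨0, by simp⟩
      · refine ⟨k+1, by simpa using hk, ?_⟩
        simp only [List.getElem_cons_succ]
        congr 1
        push_cast; ring
    · rintro ⟨k, hk, rfl⟩
      cases k with
      | zero => left; simp
      | succ k =>
        right
        refine ⟨k, by simpa using hk, ?_⟩
        simp only [List.getElem_cons_succ]
        congr 1
        push_cast; ring

-- '(u ++ [ch]) is a prefix of s' characterised by a cut position
lemma pv_append_last_prefix_iff (u s : List Char) (ch : Char) :
    (u ++ [ch]).isPrefixOf s = true ↔ ∃ (k : Nat) (h : k < s.length), s[k] = ch ∧ u = s.take k := by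
  rw [List.isPrefixOf_iff_prefix]
  constructor
  · rintro ⟨t, rfl⟩
    refine ⟨u.length, by simp, ?_, ?_⟩
    · simp only [List.append_assoc, List.singleton_append]
      simp [List.getElem_append_right]
    · simp
  · rintro ⟨k, hk, hch, rfl⟩
    refine ⟨s.drop (k+1), ?_⟩
    rw [List.append_assoc, List.singleton_append, ← hch, List.getElem_cons_drop, List.take_append_drop]

-- B's candidate list holds exactly the strings A's inner test accepts
lemma pv_mem_candidates (base cand : String) :
    cand ∈ pvB_candidates base
      ↔ (PySem.Chars.startswith base.toList (cand.toList ++ ['_']) || base == cand) = true := by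
  simp only [pvB_candidates, List.mem_cons, List.mem_map, List.mem_filter,
    Bool.or_eq_true, beq_iff_eq, PySem.Chars.startswith, pv_append_last_prefix_iff]
  constructor
  · rintro (rfl | ⟨p, ⟨hpe, hp2⟩, rfl⟩)
    · right; rfl
    · left
      obtain ⟨k, hk, rfl⟩ := (pv_mem_enumerate _ _ _).1 hpe
      refine ⟨k, hk, by simpa using hp2, ?_⟩
      simp only [PySem.Str.slice, PySem.Chars.slice_eq_listSlice]
      rw [PySem.List.slice_to _ (by simp)]
      simp
  · rintro (⟨k, hk, hch, hu⟩ | rfl)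
    · right
      refine ⟨((0:Int) + k, base.toList[k]), ⟨(pv_mem_enumerate _ _ _).2 ⟨k, hk, rfl⟩, by simpa using hch⟩, ?_⟩
      simp only [PySem.Str.slice, PySem.Chars.slice_eq_listSlice]
      rw [PySem.List.slice_to _ (by simp)]
      rw [show ((0:Int) + (k:Int)).toNat = k by omega, ← hu]
      simp
    · left; rfl

-- the dictionary maps c to the first index of c in cat_cols
lemma pv_buildIdx_aux (l : List String) (c : String) (s : Int) (d : PySem.Dict String Int) :
    ((PySem.List.enumerate l s).foldl (fun d p => d.setdefault p.2 p.1) d).get? c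
      = ((d.get? c).or ((List.idxOf? c l).map (fun n => s + (n : Int)))) := by
  induction l generalizing s d with
  | nil => simp [PySem.List.enumerate]
  | cons x t ih =>
    rw [show PySem.List.enumerate (x::t) s = (s,x) :: PySem.List.enumerate t (s+1) from rfl]
    rw [List.foldl_cons, ih, List.idxOf?_cons]
    by_cases hxc : x = c
    · subst hxc
      simp only [beq_self_eq_true, if_true]
      rw [PySem.Dict.get?_setdefault_self]
      cases hdc : d.get? x <;> simp
    · rw [PySem.Dict.get?_setdefault_of_ne _ _ (Ne.symm hxc)]
      simp only [beq_iff_eq, hxc, if_false]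
      cases hidx : List.idxOf? c t <;> cases hdc : d.get? c <;> simp [Option.or] <;> omega

lemma pv_buildIdx_get? (l : List String) (c : String) :
    (pvB_buildIdx l).get? c = (List.idxOf? c l).map (fun n => (n : Int)) := by
  rw [pvB_buildIdx, pv_buildIdx_aux]
  cases h : List.idxOf? c l <;> simp [PySem.Dict.get?, PySem.Dict.empty]

-- the best-candidate fold keeps an accumulator no candidate beats
lemma pv_fold_keep (d : PySem.Dict String Int) (cs : List String) (i : Int) (c0 : String)
    (h : ∀ c ∈ cs, ∀ j, d.get? c = some j → i ≤ j) :
    cs.foldl (pvB_step d) (some (i, c0)) = some (i, c0) := by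
  induction cs with
  | nil => rfl
  | cons c t ih =>
    rw [List.foldl_cons]
    have hstep : pvB_step d (some (i, c0)) c = some (i, c0) := by
      unfold pvB_step
      cases hfc : d.get? c with
      | none => rfl
      | some j =>
        have := h c (by simp) j hfc
        simp only []
        rw [if_neg (by omega)]
    rw [hstep]
    exact ih (fun c hc j hj => h c (by simp [hc]) j hj)

lemma pv_fold_none (d : PySem.Dict String Int) (cs : List String) (acc : Option (Int × String))
    (h : ∀ c ∈ cs, d.get? c = none) :
    cs.foldl (pvB_step d) acc = acc := by
  induction cs generalizing acc with
  | nil => rfl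
  | cons c t ih =>
    rw [List.foldl_cons]
    have hstep : pvB_step d acc c = acc := by
      unfold pvB_step
      rw [h c (by simp)]
    rw [hstep]
    exact ih acc (fun c hc => h c (by simp [hc]))

-- the best-candidate fold finds the unique minimal first index
lemma pv_fold_min (d : PySem.Dict String Int) (cs : List String) (i : Int) (c0 : String)
    (hmem : c0 ∈ cs) (hf0 : d.get? c0 = some i)
    (hmin : ∀ c ∈ cs, ∀ j, d.get? c = some j → i ≤ j)
    (huniq : ∀ c ∈ cs, d.get? c = some i → c = c0) :
    ∀ acc : Option (Int × String), (acc = none ∨ ∃ b, acc = some b ∧ i < b.1) →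
      cs.foldl (pvB_step d) acc = some (i, c0) := by
  induction cs with
  | nil => exact absurd hmem (by simp)
  | cons c t ih =>
    intro acc hacc
    rw [List.foldl_cons]
    by_cases hcc0 : c = c0
    · subst hcc0
      have hstep : pvB_step d acc c = some (i, c) := by
        unfold pvB_step
        rw [hf0]
        rcases hacc with rfl | ⟨b, rfl, hb⟩
        · rfl
        · simp only []
          rw [if_pos hb]
      rw [hstep]
      exact pv_fold_keep d t i c (fun c' hc' j hj => hmin c' (by simp [hc']) j hj)
    · have hc0t : c0 ∈ t := by
        rcases List.mem_cons.1 hmem with h | h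
        · exact absurd h.symm hcc0
        · exact h
      refine ih hc0t (fun c' hc' j hj => hmin c' (by simp [hc']) j hj)
        (fun c' hc' hj => huniq c' (by simp [hc']) hj) (pvB_step d acc c) ?_
      unfold pvB_step
      cases hfc : d.get? c with
      | none => exact hacc
      | some j =>
        have hij : i ≤ j := hmin c (by simp) j hfc
        have hne : i ≠ j := fun h => hcc0 (huniq c (by simp) (h ▸ hfc))
        rcases hacc with rfl | ⟨b, rfl, hb⟩
        · exact Or.inr ⟨(j, c), rfl, by omega⟩
        · simp only []
          split_ifs with hlt
          · exact Or.inr ⟨(j, c), rfl, by omega⟩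
          · exact Or.inr ⟨b, rfl, hb⟩

-- core: the fold over candidates reproduces A's first-match scan of cat_cols
lemma pv_cat_core (cat_cols : List String) (base : String) :
    ((pvB_candidates base).foldl (pvB_step (pvB_buildIdx cat_cols)) none).map (fun b => b.2)
      = cat_cols.find? (fun c => PySem.Chars.startswith base.toList (c.toList ++ ['_']) || base == c) := by
  set P : String → Bool := fun c => PySem.Chars.startswith base.toList (c.toList ++ ['_']) || base == c with hP
  rw [List.find?_eq_bind_findIdx?_getElem?]
  cases hfi : cat_cols.findIdx? P with
  | none =>
    rw [pv_fold_none]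
    · rfl
    · intro cand hcand
      rw [pv_buildIdx_get?]
      cases hidx : List.idxOf? cand cat_cols with
      | none => rfl
      | some n =>
        obtain ⟨hn, hgn, -⟩ := List.idxOf?_eq_some_iff.1 hidx
        have hPc : P cand = true := (pv_mem_candidates base cand).1 hcand
        have := List.findIdx?_eq_none_iff.1 hfi cat_cols[n] (by exact List.getElem_mem hn)
        rw [hgn, hPc] at this
        cases this
  | some iN =>
    obtain ⟨hlen, hPi, hminP⟩ := List.findIdx?_eq_some_iff_getElem.1 hfi
    have hmain := pv_fold_min (pvB_buildIdx cat_cols) (pvB_candidates base) (iN : Int) cat_cols[iN]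
      ((pv_mem_candidates base _).2 hPi)
      (by
        rw [pv_buildIdx_get?]
        have : List.idxOf? cat_cols[iN] cat_cols = some iN := by
          rw [List.idxOf?_eq_some_iff]
          refine ⟨hlen, rfl, fun j hj hgj => ?_⟩
          exact absurd (hgj ▸ hPi) (by simpa using hminP j hj)
        rw [this]; rfl)
      (by
        intro c hc j hj
        rw [pv_buildIdx_get?] at hj
        cases hidx : List.idxOf? c cat_cols with
        | none => rw [hidx] at hj; cases hj
        | some n =>
          rw [hidx] at hj
          obtain ⟨hn, hgn, -⟩ := List.idxOf?_eq_some_iff.1 hidx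
          have hPc : P c = true := (pv_mem_candidates base c).1 hc
          have hiN : iN ≤ n := by
            by_contra hlt
            exact absurd (hgn ▸ hPc) (by simpa using hminP n (by omega))
          simp at hj
          rw [← hj]
          exact_mod_cast hiN)
      (by
        intro c hc hj
        rw [pv_buildIdx_get?] at hj
        cases hidx : List.idxOf? c cat_cols with
        | none => rw [hidx] at hj; cases hj
        | some n =>
          rw [hidx] at hj
          simp at hj
          have hn : n = iN := by exact_mod_cast hj
          subst hn
          obtain ⟨hn', hgn, -⟩ := List.idxOf?_eq_some_iff.1 hidx
          exact hgn.symm)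
      none (Or.inl rfl)
    rw [hmain]
    simp [List.getElem?_eq_getElem hlen]

lemma pv_prefix5 (name : String) (pre : String) (h : PySem.Str.startswith name pre = true) :
    ∃ rest, name.toList = pre.toList ++ rest := by
  simp only [PySem.Str.startswith, PySem.Chars.startswith, List.isPrefixOf_iff_prefix] at h
  obtain ⟨t, ht⟩ := h
  exact ⟨t, ht.symm⟩

-- the two per-feature bodies agree
lemma pv_one (cat_cols : List String) (name : String) :
    pvA_one cat_cols name = pvB_one (pvB_buildIdx cat_cols) name := by
  unfold pvA_one pvB_one
  by_cases h1 : PySem.Str.startswith name "num__" = true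
  · rw [if_pos h1, if_pos h1]
    obtain ⟨rest, hrest⟩ := pv_prefix5 name "num__" h1
    rw [pv_baseA name 'n' 'u' 'm' rest hrest (by decide) (by decide) (by decide),
        pv_baseB name 'n' 'u' 'm' rest hrest]
  · rw [if_neg h1, if_neg h1]
    by_cases h2 : PySem.Str.startswith name "cat__" = true
    · rw [if_pos h2, if_pos h2]
      obtain ⟨rest, hrest⟩ := pv_prefix5 name "cat__" h2
      have hA := pv_baseA name 'c' 'a' 't' rest hrest (by decide) (by decide) (by decide)
      have hB := pv_baseB name 'c' 'a' 't' rest hrest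
      simp only [hA, hB]
      rw [← pv_cat_core cat_cols (String.ofList rest)]
      cases hfold : (pvB_candidates (String.ofList rest)).foldl (pvB_step (pvB_buildIdx cat_cols)) none with
      | none => rfl
      | some b => rfl
    · rw [if_neg h2, if_neg h2]

-- ===== VERDICT (by name: the statement is the Claim_ definition above) =====
theorem robust_group_map_spec : Claim_equal_robust_group_map := by
  intro feature_names num_cols cat_cols _
  unfold Spec_robust_group_map robust_group_map robust_group_map_alt
  rw [PySem.List.foldl_append_singleton_eq_map, PySem.List.foldl_append_singleton_eq_map]
  simp only [List.nil_append]
  exact List.map_congr_left (fun name _ => pv_one cat_cols name)
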